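-- pv_equiv track=rewrite | github.com/ZDawang/leetcode | 386_Lexicographical_Numbers.py | lexicalOrder3
-- ===== SOURCE A (Python) =====
-- def lexicalOrder3(n):
--     def dfs(start, result, n):
--         if start > n: return
--         for i in range(start, min(n + 1, (start//10)*10+10)):
--             result.append(i)
--             dfs(i*10, result, n)
--
--     result = []
--     dfs(1, result, n)
--     return result
-- ===== SOURCE B (Python) =====
-- def lexicalOrder3(n):
--     result = []
--     stack = [1]
--     while stack:
--         x = stack.pop()
--         if x > n:
--             continue
--         result.append(x)
--         if x % 10 != 9:
--             stack.append(x + 1)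
--         stack.append(x * 10)
--     return result
-- ===== Notes on version B (the rewrite author's own statement) =====
-- stated objective: alternative
-- what changed: A's recursive DFS (nested dfs with a for-loop and recursive calls) is replaced by a single iterative while-loop over an explicit work stack that pushes the next sibling (when the last digit is not 9) and then the first child, producing the same preorder without recursion or nested loops.
import Mathlib
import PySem

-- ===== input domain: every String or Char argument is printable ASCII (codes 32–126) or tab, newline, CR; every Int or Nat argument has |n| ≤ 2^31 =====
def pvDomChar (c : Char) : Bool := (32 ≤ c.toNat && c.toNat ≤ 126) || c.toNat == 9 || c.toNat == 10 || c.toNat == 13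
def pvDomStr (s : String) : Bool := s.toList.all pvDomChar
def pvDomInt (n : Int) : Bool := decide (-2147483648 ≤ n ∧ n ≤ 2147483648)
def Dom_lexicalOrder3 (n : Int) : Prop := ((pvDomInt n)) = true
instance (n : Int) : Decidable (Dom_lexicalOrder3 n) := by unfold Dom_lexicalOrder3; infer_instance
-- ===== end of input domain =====

-- B replaces A's recursive DFS by an iterative loop over an explicit work stack (same preorder, no recursion); objective: alternative.

-- Termination lemmas cited by name from the ports' recursions (they are about the measures only, not the algorithms).
theorem pvTwoMulSucc (A B : Nat) (h : A < B) : 2 * A + 1 < 2 * B := by omega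
theorem pvTwoMul (A B : Nat) (h : A < B) : 2 * A < 2 * B := by omega
theorem pvToNatPredLe (a b : Int) (h : a ≤ b - 1) : a.toNat ≤ b.toNat - 1 := by
  have h1 : a.toNat ≤ (b - 1).toNat := Int.toNat_le_toNat h
  have h2 : (b - 1).toNat = b.toNat - 1 := Int.pred_toNat b
  omega
theorem pvPowSplit (a : Nat) (h : 1 ≤ a) (S T : Nat)
    (hS : S ≤ 3 ^ (a - 1)) (hT : T ≤ 3 ^ (a - 1)) : S + T < 3 ^ a := by
  have hp : 0 < 3 ^ (a - 1) := Nat.pow_pos (by norm_num)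
  have h2 : 3 ^ (a - 1) + 3 ^ (a - 1) < 3 ^ (a - 1) * 3 := by omega
  have h3 : 3 ^ (a - 1) * 3 = 3 ^ a := by
    rw [← pow_succ]; exact congrArg (3 ^ ·) (Nat.succ_pred_eq_of_pos h)
  exact Nat.lt_of_le_of_lt (Nat.add_le_add hS hT) (h3 ▸ h2)
theorem pvA_mul10_pos (i : Int) (h : 1 ≤ i) : 1 ≤ i * 10 := by omega
theorem pvA_succ_pos (i : Int) (h : 1 ≤ i) : 1 ≤ i + 1 := by omega
theorem pvA_dec_loop_dfs (n i stop : Int) (h1 : 1 ≤ i) (h2 : stop ≤ n + 1) (hc : i < stop) :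
    2 * (n + 1 - i * 10).toNat + 1 < 2 * (n + 1 - i).toNat :=
  pvTwoMulSucc _ _ ((Int.toNat_lt_toNat (by omega)).2 (by omega))
theorem pvA_dec_loop_loop (n i stop : Int) (h1 : 1 ≤ i) (h2 : stop ≤ n + 1) (hc : i < stop) :
    2 * (n + 1 - (i + 1)).toNat < 2 * (n + 1 - i).toNat :=
  pvTwoMul _ _ ((Int.toNat_lt_toNat (by omega)).2 (by omega))

theorem pvB_stack_pos (n x : Int) (rest : List Int) (h : ∀ y ∈ x :: rest, 1 ≤ y) :
    ∀ y ∈ x * 10 :: ((if PySem.Int.mod x 10 ≠ 9 then [x + 1] else []) ++ rest), 1 ≤ y := by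
  have hx : 1 ≤ x := h x List.mem_cons_self
  intro y hy
  rcases List.mem_cons.1 hy with rfl | hy'
  · omega
  · rcases List.mem_append.1 hy' with hl | hr
    · have := (List.mem_ite_nil_right.1 hl).2
      rw [List.mem_singleton] at this
      omega
    · exact h y (List.mem_cons_of_mem _ hr)

theorem pvB_dec_skip (n x : Int) (rest : List Int) :
    ((rest.map fun y => 3 ^ ((n + 1 - y).toNat)).sum) < (((x :: rest).map fun y => 3 ^ ((n + 1 - y).toNat)).sum) := by
  simp only [List.map_cons, List.sum_cons]
  exact Nat.lt_add_of_pos_left (Nat.pow_pos (by norm_num))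

theorem pvB_dec_push (n x : Int) (rest : List Int) (hx : 1 ≤ x) (hxn : ¬ x > n) :
    (((x * 10 :: ((if PySem.Int.mod x 10 ≠ 9 then [x + 1] else []) ++ rest)).map fun y => 3 ^ ((n + 1 - y).toNat)).sum)
      < (((x :: rest).map fun y => 3 ^ ((n + 1 - y).toNat)).sum) := by
  simp only [List.map_cons, List.sum_cons, List.map_append, List.sum_append, ← Nat.add_assoc]
  refine Nat.add_lt_add_right ?_ _
  refine pvPowSplit ((n + 1 - x).toNat) ((Int.toNat_lt_toNat (by omega)).2 (by omega) : (0:Int).toNat < _) _ _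
    (Nat.pow_le_pow_right (by norm_num) (pvToNatPredLe _ _ (by omega)))
    ?_
  split
  · simp only [List.map_cons, List.sum_cons, List.map_nil, List.sum_nil, Nat.add_zero]
    exact Nat.pow_le_pow_right (by norm_num) (pvToNatPredLe _ _ (by omega))
  · simp only [List.map_nil, List.sum_nil]
    exact Nat.zero_le _

-- ===== PORT A =====
-- A's nested `dfs` (guard + for-loop with a recursive call per iteration), ported as a
-- mutual recursion: pvDfsA is the body of `dfs`, pvLoopA its `for i in range(start, stop)` loop.
-- The proof arguments (1 ≤ start, stop ≤ n+1) only justify termination; they hold at every call A makes.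
mutual
def pvDfsA (n start : Int) (h : 1 ≤ start) : List Int :=
  if start > n then []
  else pvLoopA n start (min (n + 1) ((PySem.Int.floordiv start 10) * 10 + 10)) h (min_le_left _ _)
termination_by 2 * (n + 1 - start).toNat + 1
decreasing_by exact Nat.lt_succ_self _

def pvLoopA (n i stop : Int) (h1 : 1 ≤ i) (h2 : stop ≤ n + 1) : List Int :=
  if hc : i < stop then
    i :: (pvDfsA n (i * 10) (pvA_mul10_pos i h1) ++ pvLoopA n (i + 1) stop (pvA_succ_pos i h1) h2)
  else []
termination_by 2 * (n + 1 - i).toNat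
decreasing_by
  · exact pvA_dec_loop_dfs n i stop h1 h2 hc
  · exact pvA_dec_loop_loop n i stop h1 h2 hc
end

def lexicalOrder3 (n : Int) : List Int := pvDfsA n 1 (le_refl 1)

-- ===== PORT B =====
-- B's `while stack:` loop; the Lean list holds the stack top-first (stack.pop() = head,
-- the two appends push x+1 (if x % 10 != 9) then x*10, so x*10 ends on top).
def pvStackB (n : Int) (s : List Int) (h : ∀ y ∈ s, 1 ≤ y) : List Int :=
  match s with
  | [] => []
  | x :: rest =>
    if hxn : x > n then
      pvStackB n rest (fun y hy => h y (List.mem_cons_of_mem _ hy))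
    else
      x :: pvStackB n (x * 10 :: ((if PySem.Int.mod x 10 ≠ 9 then [x + 1] else []) ++ rest))
        (pvB_stack_pos n x rest h)
termination_by (s.map fun y => 3 ^ ((n + 1 - y).toNat)).sum
decreasing_by
  · exact pvB_dec_skip n x rest
  · exact pvB_dec_push n x rest (h x List.mem_cons_self) hxn

def lexicalOrder3_alt (n : Int) : List Int := pvStackB n [1] (fun y hy => le_of_eq (List.mem_singleton.1 hy).symm)

-- ===== PRECONDITION & SPEC =====
def Spec_lexicalOrder3 (n : Int) (out : List Int) : Prop := out = lexicalOrder3_alt n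
instance (n : Int) (out : List Int) : Decidable (Spec_lexicalOrder3 n out) := by unfold Spec_lexicalOrder3; infer_instance

-- ===== CLAIM (what is proved, stated in full; the proofs are below) =====
def Claim_equal_lexicalOrder3 : Prop := ∀ (n : Int), Dom_lexicalOrder3 n → Spec_lexicalOrder3 n (lexicalOrder3 n)

-- ===== LEMMAS AND PROOFS =====

-- Common semantic description: gsem n x = "emit x, its subtree, then the following siblings
-- of x in its decade block" — the preorder both programs produce.
def gsem (n x : Int) : List Int :=
  if x ≤ 0 then []
  else if x > n then []
  else x :: (gsem n (x * 10) ++ (if x % 10 ≠ 9 then gsem n (x + 1) else []))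
termination_by (n + 1 - x).toNat
decreasing_by
  · omega
  · omega

theorem loopA_eq_gsem (n x : Int) (h1 : 1 ≤ x)
    (h2 : min (n + 1) ((PySem.Int.floordiv x 10) * 10 + 10) ≤ n + 1) :
    pvLoopA n x (min (n + 1) ((PySem.Int.floordiv x 10) * 10 + 10)) h1 h2 = gsem n x := by
  have hfd : PySem.Int.floordiv x 10 = x / 10 := PySem.Int.floordiv_eq_ediv_of_pos (by norm_num)
  have h10 : x % 10 < 10 ∧ 0 ≤ x % 10 ∧ x / 10 * 10 + x % 10 = x :=
    ⟨Int.emod_lt_of_pos x (by norm_num), Int.emod_nonneg x (by norm_num), Int.ediv_mul_add_emod x 10⟩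
  rw [pvLoopA, gsem]
  by_cases hxn : x > n
  · have hlt : ¬ x < min (n + 1) ((PySem.Int.floordiv x 10) * 10 + 10) := by
      rw [hfd]; omega
    rw [dif_neg hlt, if_neg (by omega : ¬ x ≤ 0), if_pos hxn]
  · have hlt : x < min (n + 1) ((PySem.Int.floordiv x 10) * 10 + 10) := by
      rw [hfd]; omega
    rw [dif_pos hlt, if_neg (by omega : ¬ x ≤ 0), if_neg hxn]
    congr 1
    congr 1
    · -- subtree: pvDfsA n (x*10) = gsem n (x*10)
      rw [pvDfsA]
      by_cases hc : x * 10 > n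
      · rw [if_pos hc, gsem, if_neg (by omega : ¬ x * 10 ≤ 0), if_pos hc]
      · rw [if_neg hc]
        exact loopA_eq_gsem n (x * 10) (by omega) _
    · -- siblings
      by_cases h9 : x % 10 = 9
      · rw [if_neg (by simpa using h9)]
        have hstop : ¬ x + 1 < min (n + 1) ((PySem.Int.floordiv x 10) * 10 + 10) := by
          rw [hfd]; omega
        rw [pvLoopA, dif_neg hstop]
      · rw [if_pos (by simpa using h9)]
        have hsame : PySem.Int.floordiv x 10 = PySem.Int.floordiv (x + 1) 10 := by
          have hfd2 : PySem.Int.floordiv (x + 1) 10 = (x + 1) / 10 := PySem.Int.floordiv_eq_ediv_of_pos (by norm_num)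
          have h10' : (x + 1) % 10 < 10 ∧ 0 ≤ (x + 1) % 10 ∧ (x + 1) / 10 * 10 + (x + 1) % 10 = x + 1 :=
            ⟨Int.emod_lt_of_pos (x + 1) (by norm_num), Int.emod_nonneg (x + 1) (by norm_num), Int.ediv_mul_add_emod (x + 1) 10⟩
          rw [hfd, hfd2]; omega
        have hrec := loopA_eq_gsem n (x + 1) (by omega) (hsame ▸ h2)
        rw [← hrec]
        congr 1 <;> rw [hsame]
termination_by (n + 1 - x).toNat
decreasing_by
  · omega
  · omega

theorem stackB_eq_gsem (n : Int) (s : List Int) (h : ∀ y ∈ s, 1 ≤ y) :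
    pvStackB n s h = (s.map (gsem n)).flatten := by
  match s with
  | [] => rw [pvStackB]; simp
  | x :: rest =>
    have hx : 1 ≤ x := h x List.mem_cons_self
    rw [pvStackB]
    by_cases hxn : x > n
    · rw [dif_pos hxn, stackB_eq_gsem n rest _]
      have hg : gsem n x = [] := by
        rw [gsem, if_neg (by omega : ¬ x ≤ 0), if_pos hxn]
      simp [hg]
    · rw [dif_neg hxn, stackB_eq_gsem n _ _]
      have hmod : PySem.Int.mod x 10 = x % 10 := PySem.Int.mod_eq_emod_of_pos (by norm_num)
      have hg : gsem n x = x :: (gsem n (x * 10) ++ (if x % 10 ≠ 9 then gsem n (x + 1) else [])) := by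
        rw [gsem, if_neg (by omega : ¬ x ≤ 0), if_neg hxn]
      simp only [List.map_cons, List.flatten_cons, List.map_append, List.flatten_append, hmod, hg]
      by_cases h9 : x % 10 = 9
      · simp [h9]
      · simp [h9]
termination_by (s.map fun y => 3 ^ ((n + 1 - y).toNat)).sum
decreasing_by
  · exact pvB_dec_skip n x rest
  · exact pvB_dec_push n x rest hx hxn

theorem dfsA_eq_gsem (n : Int) : pvDfsA n 1 (le_refl 1) = gsem n 1 := by
  rw [pvDfsA]
  by_cases hn : (1 : Int) > n
  · rw [if_pos hn, gsem]; simp [hn]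
  · rw [if_neg hn]
    exact loopA_eq_gsem n 1 (le_refl 1) _

-- ===== VERDICT (by name: the statement is the Claim_ definition above) =====
theorem lexicalOrder3_spec : Claim_equal_lexicalOrder3 := by
  intro n _
  unfold Spec_lexicalOrder3 lexicalOrder3 lexicalOrder3_alt
  rw [dfsA_eq_gsem, stackB_eq_gsem]
  simp
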